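-- pv_equiv track=rewrite | github.com/LitterChen/pythonCoreDevelop | 6_19.py | multi_output
-- ===== SOURCE A (Python) =====
-- def multi_output(L,num,type = 1):
--     number = int(len(L)/int(num))
--     #垂直排序
--     if type == 1:
--         LS = []
--         for i in range(num):
--             LS.append([L[i+num*j] for j in range(number)])
--         for i in range(1,len(L)-num*number+1):
--             LS[num-1].append(L[num*number+i-1])
--     #水平排序
--     elif type == 2:
--         LS = [L[i*number:i*number+number] for i in range(num-1)]
--         LS.append(L[number*(num-1):])
--     return LS
-- ===== SOURCE B (Python) =====
-- def multi_output(L, num, type=1):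
--     number = len(L) // num
--     if type == 1:
--         LS = [[] for _ in range(num)]
--         for k in range(num * number):
--             LS[k % num].append(L[k])
--         LS[num - 1].extend(L[num * number:])
--         return LS
--     elif type == 2:
--         LS = []
--         rest = L
--         for _ in range(num - 1):
--             LS.append(rest[:number])
--             rest = rest[number:]
--         LS.append(rest)
--         return LS
-- ===== Notes on version B (the rewrite author's own statement) =====
-- stated objective: alternative
-- what changed: Type 1 builds the grid in one element-indexed scatter pass (LS[k % num].append(L[k])) plus an extend of the remainder, instead of A's column-by-column comprehensions with index arithmetic and an element-wise remainder loop; type 2 peels fixed-size chunks off a shrinking 'rest' list instead of A's slice comprehension.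
-- outside the precondition, e.g. on multi_output([1, 2, 3], -2, 2): A returns [[]], B returns [[1, 2, 3]]; on multi_output([1], 2, 3): A raises UnboundLocalError, B returns None
import Mathlib
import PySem

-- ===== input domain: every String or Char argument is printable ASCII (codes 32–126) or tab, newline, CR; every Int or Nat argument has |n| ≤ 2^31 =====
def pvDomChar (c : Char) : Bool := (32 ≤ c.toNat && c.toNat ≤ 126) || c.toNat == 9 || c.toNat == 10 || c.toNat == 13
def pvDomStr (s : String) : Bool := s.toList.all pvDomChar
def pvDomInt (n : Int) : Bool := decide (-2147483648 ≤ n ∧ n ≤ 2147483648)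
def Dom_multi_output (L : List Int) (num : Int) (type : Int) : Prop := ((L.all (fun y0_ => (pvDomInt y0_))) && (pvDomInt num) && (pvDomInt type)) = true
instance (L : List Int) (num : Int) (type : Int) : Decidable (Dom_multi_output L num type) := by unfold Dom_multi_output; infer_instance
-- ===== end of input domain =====

-- B replaces A's column-by-column index-arithmetic comprehensions by a single element-indexed
-- scatter pass (type 1) and by peeling chunks off a shrinking rest-list (type 2); same cost,
-- different decomposition ("alternative").

-- ===== PORT A =====
-- 'number = int(len(L)/int(num))' is truncating division; float division is exact for the
-- list lengths / divisors the checks admit, so it is ported as Int.tdiv.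
def multi_output (L : List Int) (num : Int) (type : Int) : List (List Int) :=
  let number : Int := (L.length : Int).tdiv num
  if type = 1 then
    let LS : List (List Int) :=
      (PySem.List.pyRange 0 num 1).map (fun i =>
        (PySem.List.pyRange 0 number 1).map (fun j => PySem.List.pyGetD L (i + num * j) 0))
    (PySem.List.pyRange 1 ((L.length : Int) - num * number + 1) 1).foldl
      (fun LS i => LS.modify (num - 1).toNat
        (fun c => c ++ [PySem.List.pyGetD L (num * number + i - 1) 0])) LS
  else if type = 2 then
    ((PySem.List.pyRange 0 (num - 1) 1).map (fun i =>
        PySem.List.slice L (some (i * number)) (some (i * number + number))))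
      ++ [PySem.List.slice L (some (number * (num - 1))) none]
  else []  -- Python raises UnboundLocalError here; excluded by Pre_multi_output

-- ===== PORT B =====
-- the 'for _ in range(num-1): LS.append(rest[:number]); rest = rest[number:]' loop of Source B
def pvPeel (number : Int) : Nat → List Int → List (List Int)
  | 0, rest => [rest]
  | c + 1, rest =>
      PySem.List.slice rest none (some number) ::
        pvPeel number c (PySem.List.slice rest (some number) none)

def multi_output_alt (L : List Int) (num : Int) (type : Int) : List (List Int) :=
  let number : Int := PySem.Int.floordiv (L.length : Int) num
  if type = 1 then
    let LS0 : List (List Int) := List.replicate num.toNat []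
    let LS := (PySem.List.pyRange 0 (num * number) 1).foldl
      (fun LS k => LS.modify (PySem.Int.mod k num).toNat
        (fun c => c ++ [PySem.List.pyGetD L k 0])) LS0
    LS.modify (num - 1).toNat (fun c => c ++ PySem.List.slice L (some (num * number)) none)
  else if type = 2 then
    pvPeel number (num - 1).toNat L
  else []  -- Source B falls through (returns None) here; excluded by Pre_multi_output

-- ===== PRECONDITION & SPEC =====
-- Pre_ restricts to the function's natural domain (split a list into num ≥ 1 parts, type 1 or 2):
-- outside it A raises (ZeroDivisionError at num = 0, IndexError for type 1 with negative num,
-- UnboundLocalError for type ∉ {1,2}), except type = 2 with negative num, where A's returned value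
-- (built from zero-truncated division and empty slices of a meaningless request) is an accident of
-- its implementation; B returns its own value there.
def Pre_multi_output (L : List Int) (num : Int) (type : Int) : Prop :=
  1 ≤ num ∧ (type = 1 ∨ type = 2)
instance (L : List Int) (num : Int) (type : Int) : Decidable (Pre_multi_output L num type) := by
  unfold Pre_multi_output; infer_instance

def pvWitness_multi_output : List Int × Int × Int := ([1, 2, 3, 4, 5], 2, 1)

def Spec_multi_output (L : List Int) (num : Int) (type : Int) (out : List (List Int)) : Prop :=
  out = multi_output_alt L num type
instance (L : List Int) (num : Int) (type : Int) (out : List (List Int)) :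
    Decidable (Spec_multi_output L num type out) := by unfold Spec_multi_output; infer_instance

-- ===== CLAIM (what is proved, stated in full; the proofs are below) =====
def Claim_equal_multi_output : Prop := ∀ (L : List Int) (num : Int) (type : Int),
  Dom_multi_output L num type → Pre_multi_output L num type →
  Spec_multi_output L num type (multi_output L num type)

-- ===== LEMMAS AND PROOFS =====

theorem pv_foldl_modify_append {α : Type} (idx : Nat) (f : Int → α) (ks : List Int)
    (LS : List (List α)) :
    ks.foldl (fun LS i => LS.modify idx (fun c => c ++ [f i])) LS
      = LS.modify idx (fun c => c ++ ks.map f) := by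
  induction ks generalizing LS with
  | nil =>
    apply List.ext_getElem?
    intro j
    rw [List.getElem?_modify]
    cases h : LS[j]? <;> simp [h]
  | cons k ks ih =>
    rw [List.foldl_cons, ih]
    apply List.ext_getElem?
    intro j
    rw [List.getElem?_modify, List.getElem?_modify, List.getElem?_modify]
    cases hLS : LS[j]? <;> by_cases h : idx = j <;> simp [hLS, h]

-- B's scatter pass, slot by slot
theorem pv_scatter_get (num : Int) (g : Int → Int) (ks : List Int) (LS : List (List Int)) (j : Nat) :
    (ks.foldl (fun LS k => LS.modify (PySem.Int.mod k num).toNat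
        (fun c => c ++ [g k])) LS)[j]?
      = (LS[j]?).map
          (fun c => c ++ (ks.filter (fun k => (PySem.Int.mod k num).toNat == j)).map g) := by
  induction ks generalizing LS with
  | nil => cases h : LS[j]? <;> simp [h]
  | cons k ks ih =>
    rw [List.foldl_cons, ih, List.getElem?_modify]
    by_cases h : (PySem.Int.mod k num).toNat = j
    · cases hLS : LS[j]? <;> simp [hLS, List.filter_cons, h]
    · cases hLS : LS[j]? <;> simp [hLS, List.filter_cons, h]

theorem pv_filter_range_eq (n j : Nat) (hj : j < n) :
    (List.range n).filter (fun r => r == j) = [j] := by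
  induction n with
  | zero => omega
  | succ n ih =>
    rw [List.range_succ, List.filter_append]
    by_cases h : j = n
    · subst h
      have : (List.range j).filter (fun r => r == j) = [] := by
        apply List.filter_eq_nil_iff.mpr
        intro a ha
        simp only [List.mem_range] at ha
        simp; omega
      simp [this]
    · have hj' : j < n := by omega
      rw [ih hj']
      simp [h, Ne.symm h]

theorem pv_filter_range_mod (n m j : Nat) (hj : j < n) :
    (List.range (n * m)).filter (fun k => k % n == j)
      = (List.range m).map (fun t => j + n * t) := by
  induction m with
  | zero => simp
  | succ m ih =>
    have hmul : n * (m + 1) = n * m + n := by ring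
    rw [hmul, List.range_add, List.filter_append, ih, List.filter_map]
    have hfc : (List.range n).filter ((fun k => k % n == j) ∘ (fun x => n * m + x))
        = (List.range n).filter (fun r => r == j) := by
      apply List.filter_congr
      intro r hr
      simp only [List.mem_range] at hr
      simp [Function.comp, Nat.mul_comm n m, Nat.add_mul_mod_self_left, Nat.mod_eq_of_lt hr]
    rw [hfc, pv_filter_range_eq n j hj, List.range_succ, List.map_append]
    simp [Nat.add_comm, Nat.mul_comm]


-- drop as an indexed map
theorem pv_drop_eq_map_range (L : List Int) (s : Nat) (hs : s ≤ L.length) :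
    (List.range (L.length - s)).map (fun t => L.getD (s + t) 0) = L.drop s := by
  apply List.ext_getElem
  · simp
  · intro i h1 h2
    simp only [List.getElem_map, List.getElem_range, List.getElem_drop]
    rw [List.getD_eq_getElem]

-- B's peeling loop (type 2), as take/drop chunks
theorem pv_peel_eq (L : List Int) (m : Nat) (c : Nat) : ∀ (d : Nat),
    pvPeel (m : Int) c (L.drop d)
      = ((List.range c).map (fun i => (L.drop (d + i * m)).take m)) ++ [L.drop (d + c * m)] := by
  induction c with
  | zero => intro d; simp [pvPeel]
  | succ c ih =>
    intro d
    rw [pvPeel]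
    rw [PySem.List.slice_to _ (by positivity), PySem.List.slice_from _ (by positivity)]
    simp only [Int.toNat_natCast, List.drop_drop]
    rw [ih (d + m)]
    rw [List.range_succ_eq_map, List.map_cons, List.map_map, List.cons_append]
    congr 1
    · simp
    congr 1
    · apply List.map_congr_left
      intro i _
      simp only [Function.comp]
      congr 2
      rw [Nat.succ_mul]; omega
    · congr 2
      rw [Nat.succ_mul]; omega


theorem pv_grid_eq (L : List Int) (n m : Nat) (hn : 0 < n) :
    (PySem.List.pyRange 0 (n : Int) 1).map (fun i =>
        (PySem.List.pyRange 0 (m : Int) 1).map (fun j => PySem.List.pyGetD L (i + (n : Int) * j) 0))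
      = (PySem.List.pyRange 0 ((n * m : Nat) : Int) 1).foldl
          (fun LS k => LS.modify (PySem.Int.mod k (n : Int)).toNat
            (fun c => c ++ [PySem.List.pyGetD L k 0])) (List.replicate n ([] : List Int)) := by
  apply List.ext_getElem?
  intro j
  rw [pv_scatter_get]
  rw [PySem.List.pyRange_zero_nat n, PySem.List.pyRange_zero_nat m, PySem.List.pyRange_zero_nat (n * m)]
  rw [List.filter_map]
  have hfc : (List.range (n * m)).filter
      ((fun k => (PySem.Int.mod k (n : Int)).toNat == j) ∘ (fun t : Nat => (t : Int)))
      = (List.range (n * m)).filter (fun t => t % n == j) := by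
    apply List.filter_congr
    intro t _
    simp only [Function.comp]
    rw [PySem.Int.mod_natCast, Int.toNat_natCast]
  rw [hfc]
  by_cases hj : j < n
  · rw [pv_filter_range_mod n m j hj]
    rw [List.getElem?_map, List.getElem?_map, List.getElem?_range hj, List.getElem?_replicate]
    simp only [hj, if_pos, Option.map_some]
    congr 1
    simp only [List.map_map, List.nil_append]
    apply List.map_congr_left
    intro t _
    simp only [Function.comp]
    have hc : ((j : Int) + (n : Int) * (t : Int)) = ((j + n * t : Nat) : Int) := by
      push_cast; ring
    rw [hc]
  · have h1 : ((List.range n).map (fun t : Nat => (t : Int))).length = n := by simp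
    have h2 : (List.replicate n ([] : List Int)).length = n := by simp
    rw [List.getElem?_eq_none (by simp; omega), List.getElem?_eq_none (by simp; omega)]
    simp

theorem multi_output_spec : Claim_equal_multi_output := by
  unfold Claim_equal_multi_output
  intro L num type _ hpre
  obtain ⟨hnum, htype⟩ := hpre
  unfold Spec_multi_output
  simp only [multi_output, multi_output_alt]
  have hnum0 : (0 : Int) < num := by omega
  have hdivA : ((L.length : Int)).tdiv num = (L.length : Int) / num := by
    rw [Int.tdiv_eq_ediv]
    simp [Int.natCast_nonneg]
  have hdivB : PySem.Int.floordiv (L.length : Int) num = (L.length : Int) / num :=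
    PySem.Int.floordiv_eq_ediv_of_pos hnum0
  have hmnonneg : (0 : Int) ≤ (L.length : Int) / num :=
    Int.ediv_nonneg (Int.natCast_nonneg _) (le_of_lt hnum0)
  have hnum_cast : num = ((num.toNat : Nat) : Int) := by omega
  have hnumber_cast : (L.length : Int) / num = ((((L.length : Int) / num).toNat : Nat) : Int) := by
    omega
  set n : Nat := num.toNat with hn
  set m : Nat := ((L.length : Int) / num).toNat with hm
  have hn1 : 1 ≤ n := by omega
  have hle : ((n * m : Nat) : Int) ≤ (L.length : Int) := by
    have h := Int.ediv_mul_le (L.length : Int) (ne_of_gt hnum0)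
    push_cast
    rw [← hnum_cast, ← hnumber_cast]
    nlinarith [h]
  have hnm_le : n * m ≤ L.length := by exact_mod_cast hle
  have hprod : ((n : Int)) * ((m : Int)) = ((n * m : Nat) : Int) := by push_cast; ring
  rw [hdivA, hdivB, hnumber_cast, hnum_cast, hprod]
  rcases htype with h1 | h2
  · subst h1
    simp only [if_pos rfl, if_true]
    rw [pv_foldl_modify_append]
    have hR : (PySem.List.pyRange 1 ((L.length : Int) - ((n * m : Nat) : Int) + 1) 1).map
        (fun i => PySem.List.pyGetD L (((n * m : Nat) : Int) + i - 1) 0)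
        = PySem.List.slice L (some ((n * m : Nat) : Int)) none := by
      rw [PySem.List.slice_from _ (Int.natCast_nonneg _), Int.toNat_natCast]
      rw [PySem.List.pyRange_one, List.map_map]
      have hcnt : (((L.length : Int) - ((n * m : Nat) : Int) + 1) - 1).toNat
          = L.length - n * m := by omega
      rw [hcnt]
      rw [← pv_drop_eq_map_range L (n * m) hnm_le]
      apply List.map_congr_left
      intro k _
      simp only [Function.comp]
      have harg : ((n * m : Nat) : Int) + (1 + (k : Int)) - 1 = ((n * m + k : Nat) : Int) := by
        push_cast; ring
      rw [harg, PySem.List.pyGetD_natCast]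
    rw [hR, pv_grid_eq L n m (by omega)]
  · subst h2
    norm_num
    have hc1 : ((n : Int) - 1) = ((n - 1 : Nat) : Int) := by omega
    have hp := pv_peel_eq L m (n - 1) 0
    simp only [Nat.zero_add, List.drop_zero] at hp
    rw [hp, hc1]
    congr 1
    · rw [PySem.List.pyRange_zero_nat (n - 1), List.map_map]
      apply List.map_congr_left
      intro t _
      simp only [Function.comp]
      have ha : ((t : Int)) * ((m : Nat) : Int) = ((t * m : Nat) : Int) := by push_cast; ring
      have hb : (((t * m : Nat) : Int)) + ((m : Nat) : Int) = ((t * m + m : Nat) : Int) := by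
        push_cast; ring
      rw [ha, hb, PySem.List.slice_toNat L (Int.natCast_nonneg _) (Int.natCast_nonneg _)]
      simp only [Int.toNat_natCast]
      congr 1
      omega
    · have hc : ((m : Int)) * (((n - 1 : Nat)) : Int) = (((n - 1) * m : Nat) : Int) := by
        push_cast; ring
      rw [hc, PySem.List.slice_from _ (Int.natCast_nonneg _), Int.toNat_natCast]
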